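-- pv_equiv track=rewrite | github.com/maxwellnewage/python-practices | level_beginner/mas_larga.py | mas_larga
-- ===== SOURCE A (Python) =====
-- def clean_signs(phrase):
--     signs = ["¿", "?", "¡", "!", ".", ","]
--     for s in signs:
--         phrase = phrase.replace(s, "")
--     return phrase
--
-- def mas_larga(phrase):
--     phrase = clean_signs(phrase)
--     words = phrase.split()
--     largest_word = words[0]
--     for w in words:
--         if w > largest_word:
--             largest_word = w
--     return largest_word
-- ===== SOURCE B (Python) =====
-- SIGNS = "\u00bf?\u00a1!.,"
--
-- def mas_larga(phrase):
--     cleaned = "".join(c for c in phrase if c not in SIGNS)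
--     words = sorted(cleaned.split())
--     return words[-1]
-- ===== Notes on version B (the rewrite author's own statement) =====
-- stated objective: alternative
-- what changed: B removes the punctuation with one character-filter pass instead of six sequential str.replace passes, and returns the last element of the sorted word list instead of keeping a running maximum.
import Mathlib
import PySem

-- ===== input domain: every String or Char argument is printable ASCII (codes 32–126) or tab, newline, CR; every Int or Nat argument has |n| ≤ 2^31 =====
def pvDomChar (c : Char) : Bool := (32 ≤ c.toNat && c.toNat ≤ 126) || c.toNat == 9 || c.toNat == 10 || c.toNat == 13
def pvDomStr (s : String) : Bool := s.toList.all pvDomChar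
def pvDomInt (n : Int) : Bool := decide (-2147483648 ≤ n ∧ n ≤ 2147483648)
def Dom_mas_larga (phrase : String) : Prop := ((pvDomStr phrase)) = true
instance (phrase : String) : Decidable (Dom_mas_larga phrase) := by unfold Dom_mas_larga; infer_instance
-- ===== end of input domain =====

-- B removes the punctuation with one character-filter pass instead of six sequential
-- replace passes, and returns the last element of the sorted word list instead of a
-- running-max scan; same results on Pre_ (alternative, no speed claim).

-- ===== PORT A =====
def clean_signs (phrase : String) : String :=
  ["¿", "?", "¡", "!", ".", ","].foldl (fun p s => PySem.Str.replace p s "") phrase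

def mas_larga (phrase : String) : String :=
  let phrase := clean_signs phrase
  let words := PySem.Str.split₀ phrase
  let largest_word := (PySem.List.pyGet? words (0 : Int)).getD ""   -- words[0]; none = IndexError, excluded by Pre_
  words.foldl (fun largest_word w => if largest_word < w then w else largest_word) largest_word

-- ===== PORT B =====
def mas_larga_alt (phrase : String) : String :=
  let cleaned := String.ofList (phrase.toList.filter (fun c => !(['¿', '?', '¡', '!', '.', ','].contains c)))
  let words := PySem.List.sorted (PySem.Str.split₀ cleaned) (fun w => w)
  (PySem.List.pyGet? words (-1 : Int)).getD ""   -- sorted(words)[-1]; none = IndexError, excluded by Pre_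

-- ===== PRECONDITION & SPEC =====
-- Pre_ excludes exactly the inputs with no word left after cleaning (empty or
-- whitespace/punctuation-only phrases), on which A (words[0]) raises IndexError.
def Pre_mas_larga (phrase : String) : Prop :=
  (phrase.toList.any (fun c =>
    !PySem.Chars.isspace c && !(['¿', '?', '¡', '!', '.', ','].contains c))) = true
instance (phrase : String) : Decidable (Pre_mas_larga phrase) := by unfold Pre_mas_larga; infer_instance
def pvWitness_mas_larga : String := "ab"

def Spec_mas_larga (phrase : String) (out : String) : Prop := out = mas_larga_alt phrase
instance (phrase : String) (out : String) : Decidable (Spec_mas_larga phrase out) := by unfold Spec_mas_larga; infer_instance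

-- ===== CLAIM (what is proved, stated in full; the proofs are below) =====
def Claim_equal_mas_larga : Prop := ∀ (phrase : String), Dom_mas_larga phrase → Pre_mas_larga phrase → Spec_mas_larga phrase (mas_larga phrase)

-- ===== LEMMAS AND PROOFS =====

-- replace with a single-char pattern and empty replacement is a character filter
lemma replace_go_single (c : Char) : ∀ (fuel : Nat) (l acc : List Char), l.length ≤ fuel →
    PySem.Chars.replace.go [c] [] fuel l acc = acc.reverse ++ l.filter (fun x => x ≠ c) := by
  intro fuel
  induction fuel with
  | zero =>
      intro l acc h
      have : l = [] := List.eq_nil_of_length_eq_zero (Nat.le_zero.mp h)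
      subst this; simp [PySem.Chars.replace.go]
  | succ n ih =>
      intro l acc h
      cases l with
      | nil => simp [PySem.Chars.replace.go]
      | cons x t =>
          simp only [PySem.Chars.replace.go, List.isPrefixOf, Bool.and_true,
            List.length_cons, List.drop_succ_cons, List.reverse_nil, List.nil_append]
          by_cases hx : c = x
          · subst hx
            rw [if_pos (by simp)]
            rw [ih _ _ (by simpa using h)]
            simp
          · rw [if_neg (by simp [hx])]
            rw [ih t (x :: acc) (by simpa using h)]
            simp [Ne.symm hx]

lemma replace_single (cs : List Char) (c : Char) :
    PySem.Chars.replace cs [c] [] = cs.filter (fun x => x ≠ c) := by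
  simp only [PySem.Chars.replace, List.isEmpty_cons, Bool.false_eq_true, if_false]
  simpa using replace_go_single c cs.length cs [] le_rfl

lemma clean_toList (p : String) :
    (clean_signs p).toList = p.toList.filter (fun c => !(['¿', '?', '¡', '!', '.', ','].contains c)) := by
  simp only [clean_signs, List.foldl]
  simp only [PySem.Str.toList_replace]
  have h0 : ("" : String).toList = [] := rfl
  have h1 : ("¿" : String).toList = ['¿'] := rfl
  have h2 : ("?" : String).toList = ['?'] := rfl
  have h3 : ("¡" : String).toList = ['¡'] := rfl
  have h4 : ("!" : String).toList = ['!'] := rfl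
  have h5 : ("." : String).toList = ['.'] := rfl
  have h6 : (",".toList) = [','] := rfl
  rw [h0, h1, h2, h3, h4, h5, h6]
  rw [replace_single, replace_single, replace_single, replace_single, replace_single, replace_single]
  simp only [List.filter_filter]
  apply List.filter_congr
  intro a _
  by_cases e1 : a = '¿' <;> by_cases e2 : a = '?' <;> by_cases e3 : a = '¡' <;>
    by_cases e4 : a = '!' <;> by_cases e5 : a = '.' <;> by_cases e6 : a = ',' <;>
    simp_all

-- split() of a list with a non-space character somewhere is nonempty
lemma split₀_go_ne_nil : ∀ (l cur : List Char) (accs : List (List Char)),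
    ((∃ c ∈ l, PySem.Chars.isspace c = false) ∨ cur ≠ [] ∨ accs ≠ []) →
    PySem.Chars.split₀.go l cur accs ≠ [] := by
  intro l
  induction l with
  | nil =>
      intro cur accs h
      simp only [PySem.Chars.split₀.go]
      rcases h with h | h | h
      · simp at h
      · simp [List.isEmpty_iff, h]
      · by_cases hc : cur.isEmpty <;> simp [hc, h]
  | cons x t ih =>
      intro cur accs h
      simp only [PySem.Chars.split₀.go]
      by_cases hs : PySem.Chars.isspace x = true
      · by_cases hc : cur.isEmpty
        · rw [if_pos hs, if_pos hc]
          apply ih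
          rcases h with ⟨c, hc', hns⟩ | h | h
          · rcases List.mem_cons.mp hc' with rfl | hc'
            · rw [hs] at hns; cases hns
            · exact Or.inl ⟨c, hc', hns⟩
          · exact absurd (List.isEmpty_iff.mp hc) h
          · exact Or.inr (Or.inr h)
        · rw [if_pos hs, if_neg hc]
          exact ih _ _ (Or.inr (Or.inr (by simp)))
      · rw [if_neg hs]
        exact ih _ _ (Or.inr (Or.inl (by simp)))

lemma split₀_ne_nil (cs : List Char) (h : ∃ c ∈ cs, PySem.Chars.isspace c = false) :
    PySem.Chars.split₀ cs ≠ [] := by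
  simpa [PySem.Chars.split₀] using split₀_go_ne_nil cs [] [] (Or.inl h)

-- the running-max fold: membership and upper bound
lemma foldl_max_mem {α : Type} [LinearOrder α] : ∀ (l : List α) (a : α),
    l.foldl (fun x w => if x < w then w else x) a ∈ a :: l := by
  intro l
  induction l with
  | nil => intro a; simp
  | cons x t ih =>
      intro a
      simp only [List.foldl]
      by_cases h : a < x
      · rw [if_pos h]
        rcases List.mem_cons.mp (ih x) with h' | h' <;> simp_all
      · rw [if_neg h]
        rcases List.mem_cons.mp (ih a) with h' | h' <;> simp_all

lemma start_le_foldl_max {α : Type} [LinearOrder α] : ∀ (l : List α) (a : α),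
    a ≤ l.foldl (fun x w => if x < w then w else x) a := by
  intro l
  induction l with
  | nil => intro a; simp
  | cons x t ih =>
      intro a
      simp only [List.foldl]
      by_cases h : a < x
      · rw [if_pos h]; exact le_trans h.le (ih x)
      · rw [if_neg h]; exact ih a

lemma mem_le_foldl_max {α : Type} [LinearOrder α] : ∀ (l : List α) (a y : α), y ∈ l →
    y ≤ l.foldl (fun x w => if x < w then w else x) a := by
  intro l
  induction l with
  | nil => intro a y hy; simp at hy
  | cons x t ih =>
      intro a y hy
      simp only [List.foldl]
      rcases List.mem_cons.mp hy with rfl | hy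
      · by_cases h : a < y
        · rw [if_pos h]; exact start_le_foldl_max t y
        · rw [if_neg h]
          exact le_trans (le_of_not_gt h) (start_le_foldl_max t a)
      · exact ih _ y hy

lemma le_foldl_max {α : Type} [LinearOrder α] (l : List α) (a y : α) (hy : y ∈ a :: l) :
    y ≤ l.foldl (fun x w => if x < w then w else x) a := by
  rcases List.mem_cons.mp hy with rfl | hy
  · exact start_le_foldl_max l y
  · exact mem_le_foldl_max l a y hy

-- the last element of a ≤-sorted nonempty list bounds all its elements
lemma le_getLast_of_pairwise {α : Type} [LinearOrder α] : ∀ (l : List α) (h : l ≠ [])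
    (_ : l.Pairwise (· ≤ ·)) (y : α), y ∈ l → y ≤ l.getLast h := by
  intro l
  induction l with
  | nil => intro h; simp at h
  | cons x t ih =>
      intro h hp y hy
      cases t with
      | nil => simp_all
      | cons z s =>
          rw [List.getLast_cons (by simp)]
          rcases List.mem_cons.mp hy with rfl | hy
          · calc y ≤ z := (List.pairwise_cons.mp hp).1 z (by simp)
              _ ≤ (z :: s).getLast (by simp) :=
                ih (by simp) (List.pairwise_cons.mp hp).2 z (by simp)
          · exact ih (by simp) (List.pairwise_cons.mp hp).2 y hy

-- ===== VERDICT (by name: the statement is the Claim_ definition above) =====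
theorem mas_larga_spec : Claim_equal_mas_larga := by
  intro phrase _ hpre
  unfold Pre_mas_larga at hpre
  rw [List.any_eq_true] at hpre
  obtain ⟨c, hcmem, hcprop⟩ := hpre
  rw [Bool.and_eq_true, Bool.not_eq_true', Bool.not_eq_true'] at hcprop
  obtain ⟨hcns, hcsign'⟩ := hcprop
  have hcsign : c ∉ ['¿', '?', '¡', '!', '.', ','] := by
    simpa using hcsign'
  -- the cleaned phrase still holds a non-space character, so the word list is nonempty
  have hcw : PySem.Str.split₀ (clean_signs phrase) ≠ [] := by
    intro hnil
    have h2 : PySem.Chars.split₀ (clean_signs phrase).toList = [] := by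
      rw [← PySem.Str.split₀_map_toList, hnil]; rfl
    apply split₀_ne_nil (clean_signs phrase).toList _ h2
    refine ⟨c, ?_, hcns⟩
    rw [clean_toList]
    simp only [List.mem_filter]
    exact ⟨hcmem, by simpa using hcsign⟩
  -- both programs clean the phrase to the same string
  have hclean : clean_signs phrase
      = String.ofList (phrase.toList.filter (fun c => !(['¿', '?', '¡', '!', '.', ','].contains c))) := by
    rw [← clean_toList phrase]
    exact String.ofList_toList.symm
  unfold Spec_mas_larga mas_larga mas_larga_alt
  show (PySem.Str.split₀ (clean_signs phrase)).foldl
        (fun largest_word w => if largest_word < w then w else largest_word)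
        ((PySem.List.pyGet? (PySem.Str.split₀ (clean_signs phrase)) (0 : Int)).getD "")
      = (PySem.List.pyGet? (PySem.List.sorted
          (PySem.Str.split₀ (String.ofList (phrase.toList.filter
            (fun c => !(['¿', '?', '¡', '!', '.', ','].contains c))))) (fun w => w)) (-1 : Int)).getD ""
  rw [← hclean]
  generalize hG : PySem.Str.split₀ (clean_signs phrase) = W
  rw [hG] at hcw
  obtain ⟨w, ws, rfl⟩ := List.exists_cons_of_ne_nil hcw
  have hsnil : PySem.List.sorted (w :: ws) (fun x => x) ≠ [] := by
    rw [Ne, PySem.List.sorted_eq_nil_iff]; simp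
  rw [PySem.List.pyGet?_zero_cons, PySem.List.pyGet?_neg_one,
    List.getLast?_eq_getLast_of_ne_nil hsnil]
  simp only [Option.getD_some]
  have hperm := PySem.List.sorted_perm (w :: ws) (fun x => x) false
  have hpw : (PySem.List.sorted (w :: ws) (fun x => x)).Pairwise (· ≤ ·) :=
    PySem.List.sorted_pairwise (w :: ws) (fun x => x)
  apply le_antisymm
  · -- the running max is a word, hence bounded by the last element of the sorted list
    apply le_getLast_of_pairwise _ hsnil hpw
    apply hperm.mem_iff.mpr
    rcases List.mem_cons.mp (foldl_max_mem (w :: ws) w) with h | h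
    · rw [h]; simp
    · exact h
  · -- the last element of the sorted list is a word, hence bounded by the running max
    exact le_foldl_max (w :: ws) w _
      (List.mem_cons_of_mem w (hperm.mem_iff.mp (List.getLast_mem hsnil)))
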